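-- pv_equiv track=rewrite | github.com/PetrPrazak/AdventOfCode | 2019/04/aoc2019_04.py | filter_password1
-- ===== SOURCE A (Python) =====
-- def filter_password1(num):
--     digits = [int(d) for d in str(num)]
--     prev = 0
--     for d in digits:
--         if d < prev:
--             return False
--         prev = d
--     return len(set(digits)) < len(digits)
-- ===== SOURCE B (Python) =====
-- def filter_password1(num):
--     digits = [int(d) for d in str(num)]
--     has_dup = False
--     for a, b in zip(digits, digits[1:]):
--         if a > b:
--             return False
--         if a == b:
--             has_dup = True
--     return has_dup
-- ===== Notes on version B (the rewrite author's own statement) =====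
-- stated objective: simpler
-- what changed: Replaces A's separate monotonicity loop plus set-based duplicate count with one pass over consecutive digit pairs that both rejects a decreasing pair and records an adjacent duplicate (valid since in a non-decreasing sequence every duplicate is adjacent), so no set is built.
import Mathlib
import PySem

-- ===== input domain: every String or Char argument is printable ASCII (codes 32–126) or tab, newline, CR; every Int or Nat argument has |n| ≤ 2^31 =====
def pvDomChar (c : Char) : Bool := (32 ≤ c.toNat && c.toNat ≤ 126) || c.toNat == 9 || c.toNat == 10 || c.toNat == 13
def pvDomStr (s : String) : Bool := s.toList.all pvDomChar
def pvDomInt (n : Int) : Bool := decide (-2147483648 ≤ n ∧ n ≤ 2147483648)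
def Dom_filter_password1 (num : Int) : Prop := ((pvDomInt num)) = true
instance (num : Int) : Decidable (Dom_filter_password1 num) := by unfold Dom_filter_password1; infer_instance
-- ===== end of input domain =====

-- B replaces A's monotonicity loop + set-based duplicate count by a single pass over
-- consecutive digit pairs (in a non-decreasing sequence every duplicate is adjacent); simpler.


-- digits = [int(d) for d in str(num)] — identical first line of A and of B.
-- int(d) is PySem.Int.ofStr?; the '.getD' only discharges the Option: under
-- Pre_ (num non-negative) every character of str(num) is a digit, so ofStr? is some there.
def pvDigits (num : Int) : List Int :=
  (PySem.Int.toChars num).map (fun c => (PySem.Int.ofStr? (String.ofList [c])).getD 0)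

-- ===== PORT A =====
-- A's for-loop with early 'return False'; prev starts at 0
def pvChk : Int → List Int → Bool
  | _, [] => true
  | prev, d :: rest => if d < prev then false else pvChk d rest

def filter_password1 (num : Int) : Bool :=
  let digits := pvDigits num
  if pvChk 0 digits then decide ((PySem.Set.ofList digits).length < digits.length) else false

-- ===== PORT B =====
-- B's one pass over zip(digits, digits[1:]) with early 'return False' and a has_dup flag
def pvScan : Bool → List (Int × Int) → Bool
  | dup, [] => dup
  | dup, (a, b) :: rest => if a > b then false else pvScan (dup || (a == b)) rest

def filter_password1_alt (num : Int) : Bool :=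
  let digits := pvDigits num
  pvScan false (digits.zip digits.tail)

-- ===== PRECONDITION & SPEC =====
-- Pre_ excludes negative num, on which A raises ValueError (int() of the sign character).
def Pre_filter_password1 (num : Int) : Prop := 0 ≤ num
instance (num : Int) : Decidable (Pre_filter_password1 num) := by unfold Pre_filter_password1; infer_instance

def pvWitness_filter_password1 : Int := (112233)

def Spec_filter_password1 (num : Int) (out : Bool) : Prop := out = filter_password1_alt num
instance (num : Int) (out : Bool) : Decidable (Spec_filter_password1 num out) := by unfold Spec_filter_password1; infer_instance

-- ===== CLAIM (what is proved, stated in full; the proofs are below) =====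
def Claim_equal_filter_password1 : Prop := ∀ (num : Int), Dom_filter_password1 num → Pre_filter_password1 num → Spec_filter_password1 num (filter_password1 num)

-- ===== LEMMAS AND PROOFS =====

-- int() of any single character is none or a non-negative value
lemma pv_single_nonneg (c : Char) (v : Int) (h : PySem.Int.ofChars? [c] = some v) : 0 ≤ v := by
  by_cases hm : c = '-'
  · subst hm
    have hn : PySem.Int.ofChars? ['-'] = none := by decide
    rw [hn] at h; cases h
  · unfold PySem.Int.ofChars? at h
    by_cases hs : PySem.Int.isIntSpace c = true
    · simp [List.dropWhile, hs, Option.bind_eq_some_iff] at h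
      obtain ⟨a, -, rfl⟩ := h; positivity
    · simp only [List.dropWhile, hs] at h
      split at h
      · rename_i cs ds heq
        simp [hs] at heq
        exact absurd heq.1 hm
      · simp [Option.bind_eq_some_iff] at h; obtain ⟨a, -, rfl⟩ := h; positivity
      · simp [Option.bind_eq_some_iff] at h; obtain ⟨a, -, rfl⟩ := h; positivity

lemma pvDigits_nonneg (num : Int) : ∀ x ∈ pvDigits num, 0 ≤ x := by
  intro x hx
  simp only [pvDigits, List.mem_map] at hx
  obtain ⟨c, -, rfl⟩ := hx
  rcases h : PySem.Int.ofStr? (String.ofList [c]) with _ | v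
  · simp
  · simp only [Option.getD_some]
    exact pv_single_nonneg c v (by simpa [PySem.Int.ofStr?] using h)

lemma pvChk_iff (l : List Int) : ∀ prev, pvChk prev l = true ↔ List.IsChain (· ≤ ·) (prev :: l) := by
  induction l with
  | nil => intro prev; simp [pvChk]
  | cons d rest ih =>
      intro prev
      simp only [pvChk, List.isChain_cons_cons]
      split_ifs with h
      · simp; omega
      · rw [ih d]; simp; omega

lemma pv_chain0_iff (l : List Int) (hnn : ∀ x ∈ l, 0 ≤ x) :
    List.IsChain (· ≤ ·) ((0 : Int) :: l) ↔ List.IsChain (· ≤ ·) l := by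
  cases l with
  | nil => simp
  | cons a t =>
      rw [List.isChain_cons_cons]
      exact ⟨fun h => h.2, fun h => ⟨hnn a (List.mem_cons_self ..), h⟩⟩

lemma pvScan_break (l : List Int) : ∀ dup, ¬ List.IsChain (· ≤ ·) l →
    pvScan dup (l.zip l.tail) = false := by
  induction l with
  | nil => intro dup h; exact absurd List.isChain_nil h
  | cons a t ih =>
      intro dup h
      cases t with
      | nil => exact absurd (List.isChain_singleton a) h
      | cons b t' =>
          rw [List.isChain_cons_cons] at h
          simp only [List.tail_cons, List.zip_cons_cons, pvScan]
          split_ifs with hab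
          · rfl
          · exact ih _ (fun hc => h ⟨by omega, hc⟩)

lemma pvScan_chain (l : List Int) : ∀ dup, List.IsChain (· ≤ ·) l →
    pvScan dup (l.zip l.tail) = (dup || (l.zip l.tail).any (fun p => p.1 == p.2)) := by
  induction l with
  | nil => intro dup _; simp [pvScan]
  | cons a t ih =>
      intro dup h
      cases t with
      | nil => simp [pvScan]
      | cons b t' =>
          rw [List.isChain_cons_cons] at h
          simp only [List.tail_cons] at ih
          simp only [List.tail_cons, List.zip_cons_cons, pvScan, List.any_cons]
          split_ifs with hab
          · omega
          · rw [ih _ h.2]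
            simp [Bool.or_assoc]

-- in a non-decreasing list, duplicates are exactly adjacent equal pairs
lemma pv_nodup_iff_no_adj (l : List Int) (h : List.IsChain (· ≤ ·) l) :
    l.Nodup ↔ (l.zip l.tail).all (fun p => !(p.1 == p.2)) = true := by
  induction l with
  | nil => simp
  | cons a t ih =>
      cases t with
      | nil => simp
      | cons b t' =>
          rw [List.isChain_cons_cons] at h
          have hpw : (b :: t').Pairwise (· ≤ ·) := List.isChain_iff_pairwise.mp h.2
          simp only [List.tail_cons] at ih ⊢
          rw [List.zip_cons_cons, List.nodup_cons, ih h.2, List.all_cons, Bool.and_eq_true]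
          constructor
          · rintro ⟨hna, hall⟩
            exact ⟨by simpa using fun he => hna (by simp [he]), hall⟩
          · rintro ⟨hne, hall⟩
            have hab : a ≠ b := by simpa using hne
            refine ⟨?_, hall⟩
            intro hmem
            rcases List.mem_cons.mp hmem with rfl | hmem'
            · exact hab rfl
            · have h1 : b ≤ a := (List.pairwise_cons.mp hpw).1 a hmem'
              have h2 : a < b := lt_of_le_of_ne h.1 hab
              omega

-- len(set(l)) < len(l) iff l has a duplicate
lemma pv_setLen_lt (l : List Int) : ((PySem.Set.ofList l).length < l.length) ↔ ¬ l.Nodup := by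
  have hnd : (PySem.Set.ofList l).Nodup := PySem.Set.nodup_ofList l
  have hfin : (PySem.Set.ofList l).toFinset = l.toFinset := by
    ext x; simp [PySem.Set.mem_ofList]
  have hlen : (PySem.Set.ofList l).length = l.toFinset.card := by
    rw [← hfin]; exact (List.toFinset_card_of_nodup hnd).symm
  rw [hlen]
  constructor
  · intro h hnl
    rw [List.toFinset_card_of_nodup hnl] at h
    omega
  · intro hnl
    have hsub : List.Sublist l.dedup l := List.dedup_sublist l
    have hlt : l.dedup.length < l.length := by
      rcases lt_or_eq_of_le hsub.length_le with h | h
      · exact h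
      · exact absurd (hsub.eq_of_length h ▸ l.nodup_dedup) hnl
    calc l.toFinset.card = l.dedup.length := List.card_toFinset l
      _ < l.length := hlt

-- ===== VERDICT (by name: the statement is the Claim_ definition above) =====
theorem filter_password1_spec : Claim_equal_filter_password1 := by
  intro num _ _
  unfold Spec_filter_password1 filter_password1 filter_password1_alt
  have hnn := pvDigits_nonneg num
  set l := pvDigits num with hl
  by_cases hc : pvChk 0 l = true
  · have hchain : List.IsChain (· ≤ ·) l :=
      (pv_chain0_iff l hnn).mp ((pvChk_iff l 0).mp hc)
    simp only [hc, if_true]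
    rw [pvScan_chain l false hchain]
    have hanyall : (l.zip l.tail).any (fun p => p.1 == p.2)
        = !(l.zip l.tail).all (fun p => !(p.1 == p.2)) := by rw [List.any_eq_not_all_not]
    have hiff : ((PySem.Set.ofList l).length < l.length) ↔
        ((l.zip l.tail).any (fun p => p.1 == p.2) = true) := by
      rw [pv_setLen_lt l, pv_nodup_iff_no_adj l hchain, hanyall]
      simp
    simp only [Bool.false_or]
    by_cases hp : (PySem.Set.ofList l).length < l.length
    · simp [hp, hiff.mp hp]
    · have hf : (l.zip l.tail).any (fun p => p.1 == p.2) = false :=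
        Bool.eq_false_iff.mpr (fun h => hp (hiff.mpr h))
      simp [hp, hf]
  · have hnc : ¬ List.IsChain (· ≤ ·) l := fun hch =>
      hc ((pvChk_iff l 0).mpr ((pv_chain0_iff l hnn).mpr hch))
    rw [pvScan_break l false hnc]
    simp [hc]
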